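-- pv_equiv track=rewrite | github.com/haoyang9804/HirGen | Techs/MT-DLComp/mutation/shape_utils.py | get_common_shape
-- ===== SOURCE A (Python) =====
-- def get_common_shape(shapes, broadcast=True):
--     """
--
--     :param shapes: shape list to be matched
--     :param broadcast: whether broadcast is allowed
--     :return: output shape after broadcasting if broadcast=True
--     else minimum dim value but maximum rank
--     """
--     r = max(len(s) for s in shapes)
--     common_s = []
--     for i in range(0, r):
--         if broadcast:
--             dim_i = [s[i] for s in shapes if len(s) > i and s[i] != 1]
--         else:
--             dim_i = [s[i] for s in shapes if len(s) > i]
--         if not dim_i: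
--             min_dim = 1
--         else:
--             min_dim = min(dim_i)
--         common_s.append(min_dim)
--     return tuple(common_s)
-- ===== SOURCE B (Python) =====
-- def get_common_shape(shapes, broadcast=True):
--     """Single pass over each shape, keeping a per-index running minimum in a dict."""
--     r = 0
--     best = {}
--     for s in shapes:
--         if len(s) > r:
--             r = len(s)
--         for i, d in enumerate(s):
--             if broadcast and d == 1:
--                 continue
--             if i not in best or d < best[i]:
--                 best[i] = d
--     return tuple(best.get(i, 1) for i in range(r))
-- ===== Notes on version B (the rewrite author's own statement) =====
-- stated objective: alternative
-- what changed: Instead of scanning all shapes once per index (rebuilding a filtered dim list and calling min for each of the r indices), B makes a single pass over each shape, maintaining a per-index running minimum in a dict and the running max rank, then reads the answer off the dict.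
-- outside the precondition, e.g. on get_common_shape([], True): A raises ValueError, B returns ()
import Mathlib
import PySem

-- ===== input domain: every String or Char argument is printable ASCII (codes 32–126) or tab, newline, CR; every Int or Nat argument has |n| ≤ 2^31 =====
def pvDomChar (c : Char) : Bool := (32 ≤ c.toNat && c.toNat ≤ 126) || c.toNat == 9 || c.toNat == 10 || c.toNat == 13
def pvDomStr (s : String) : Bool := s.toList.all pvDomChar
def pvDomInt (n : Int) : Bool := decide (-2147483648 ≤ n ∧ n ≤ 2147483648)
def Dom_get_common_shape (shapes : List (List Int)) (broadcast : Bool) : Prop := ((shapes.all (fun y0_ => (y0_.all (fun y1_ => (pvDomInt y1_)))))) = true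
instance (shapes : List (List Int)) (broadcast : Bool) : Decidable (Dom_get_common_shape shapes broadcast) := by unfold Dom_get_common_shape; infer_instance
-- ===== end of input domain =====

-- B replaces A's per-index rescans of all shapes by a single pass over each shape
-- maintaining a per-index running minimum in a dict (objective: alternative algorithm).

-- ===== PORT A =====
def get_common_shape (shapes : List (List Int)) (broadcast : Bool) : List Int :=
  match PySem.List.max? (shapes.map (fun s => (s.length : Int))) (fun x => x) with
  | none => []   -- Python: max(() ) raises ValueError; excluded by Pre_
  | some r =>
    (PySem.List.pyRange 0 r 1).foldl (fun common_s i =>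
      let dim_i : List Int :=
        if broadcast then
          (shapes.filter (fun s => decide ((s.length : Int) > i) && (PySem.List.pyGetD s i 0 != 1))).map
            (fun s => PySem.List.pyGetD s i 0)
        else
          (shapes.filter (fun s => decide ((s.length : Int) > i))).map
            (fun s => PySem.List.pyGetD s i 0)
      let min_dim : Int :=
        if dim_i = [] then 1
        else (PySem.List.min? dim_i (fun x => x)).getD 1
      common_s ++ [min_dim]) []

-- ===== PORT B =====
-- one enumerate-loop step of Source B: 'if broadcast and d == 1: continue; if i not in best or d < best[i]: best[i] = d'
def pvUpdStep (broadcast : Bool) (best : PySem.Dict Int Int) (p : Int × Int) : PySem.Dict Int Int :=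
  if broadcast && p.2 == 1 then best
  else if !(best.contains p.1) || p.2 < best.getD p.1 0 then best.insert p.1 p.2
  else best

-- Source B's inner loop 'for i, d in enumerate(s): …'
def pvMergeShape (broadcast : Bool) (best : PySem.Dict Int Int) (s : List Int) : PySem.Dict Int Int :=
  (PySem.List.enumerate s 0).foldl (pvUpdStep broadcast) best

def get_common_shape_alt (shapes : List (List Int)) (broadcast : Bool) : List Int :=
  let st := shapes.foldl
    (fun (st : Int × PySem.Dict Int Int) s =>
      (if (s.length : Int) > st.1 then (s.length : Int) else st.1, pvMergeShape broadcast st.2 s))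
    ((0 : Int), PySem.Dict.empty)
  (PySem.List.pyRange 0 st.1 1).map (fun i => st.2.getD i 1)

-- ===== PRECONDITION & SPEC =====
-- Pre_ excludes only shapes = [], where Python A raises ValueError (max of an empty sequence).
def Pre_get_common_shape (shapes : List (List Int)) (broadcast : Bool) : Prop := shapes ≠ []
instance (shapes : List (List Int)) (broadcast : Bool) : Decidable (Pre_get_common_shape shapes broadcast) := by unfold Pre_get_common_shape; infer_instance
def pvWitness_get_common_shape : List (List Int) × Bool := ([[2, 1], [3]], true)


def Spec_get_common_shape (shapes : List (List Int)) (broadcast : Bool) (out : List Int) : Prop := out = get_common_shape_alt shapes broadcast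
instance (shapes : List (List Int)) (broadcast : Bool) (out : List Int) : Decidable (Spec_get_common_shape shapes broadcast out) := by unfold Spec_get_common_shape; infer_instance

-- ===== CLAIM (what is proved, stated in full; the proofs are below) =====
def Claim_equal_get_common_shape : Prop := ∀ (shapes : List (List Int)) (broadcast : Bool), Dom_get_common_shape shapes broadcast → Pre_get_common_shape shapes broadcast → Spec_get_common_shape shapes broadcast (get_common_shape shapes broadcast)

-- ===== LEMMAS AND PROOFS =====

-- option-valued running minimum of one more dimension value (skipping 1s when broadcasting)
def pvUpd (b : Bool) (a : Option Int) (d : Int) : Option Int :=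
  if b && d == 1 then a else
  match a with
  | none => some d
  | some m => some (min m d)

-- the effect of one shape on column i
def pvCStep (b : Bool) (i : Int) (a : Option Int) (s : List Int) : Option Int :=
  if (s.length : Int) > i then pvUpd b a (PySem.List.pyGetD s i 0) else a

def pvOmin (a : Option Int) (d : Int) : Option Int :=
  match a with | none => some d | some m => some (min m d)

lemma pv_foldl_omin_some : ∀ (t : List Int) (d : Int), t.foldl pvOmin (some d) = some (t.foldl min d) := by
  intro t
  induction t with
  | nil => intro d; rfl
  | cons x t ih => intro d; simpa [pvOmin] using ih (min d x)

lemma pv_foldl_cstep_eq (b : Bool) (i : Int) :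
    ∀ (shapes : List (List Int)) (a : Option Int),
      shapes.foldl (pvCStep b i) a =
        ((shapes.filter (fun s => decide ((s.length : Int) > i) && (!b || PySem.List.pyGetD s i 0 != 1))).map
          (fun s => PySem.List.pyGetD s i 0)).foldl pvOmin a := by
  intro shapes
  induction shapes with
  | nil => intro a; rfl
  | cons s t ih =>
    intro a
    by_cases hl : (s.length : Int) > i
    · by_cases h1 : PySem.List.pyGetD s i 0 = 1
      · cases b <;> simp [pvCStep, pvUpd, hl, h1, ih, pvOmin]
      · cases b <;> simp [pvCStep, pvUpd, hl, h1, ih, pvOmin]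
    · simp [pvCStep, hl, ih]

lemma pv_minDim_eq (dims : List Int) :
    (if dims = [] then (1 : Int) else (PySem.List.min? dims (fun x => x)).getD 1) =
      (dims.foldl pvOmin none).getD 1 := by
  cases dims with
  | nil => rfl
  | cons d t =>
    simp [PySem.List.min?_id_cons, pvOmin, pv_foldl_omin_some]

lemma pv_updStep_get?_self (b : Bool) (best : PySem.Dict Int Int) (k d : Int) :
    (pvUpdStep b best (k, d)).get? k = pvUpd b (best.get? k) d := by
  unfold pvUpdStep pvUpd
  by_cases h1 : (b && d == 1) = true
  · simp [h1]
  · cases hc : best.get? k with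
    | none =>
      have hcon : best.contains k = false := by rw [PySem.Dict.contains_eq_isSome_get?, hc]; rfl
      simp [h1, hcon, PySem.Dict.get?_insert_self]
    | some m =>
      have hcon : best.contains k = true := by rw [PySem.Dict.contains_eq_isSome_get?, hc]; rfl
      have hgd : best.getD k 0 = m := by rw [PySem.Dict.getD_eq_get?_getD, hc]; rfl
      by_cases hlt : d < m
      · simp [h1, hcon, hgd, hlt, PySem.Dict.get?_insert_self, min_eq_right hlt.le]
      · simp [h1, hcon, hgd, hlt, hc, min_eq_left (not_lt.1 hlt)]

lemma pv_updStep_get?_ne (b : Bool) (best : PySem.Dict Int Int) (k d i : Int) (h : i ≠ k) :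
    (pvUpdStep b best (k, d)).get? i = best.get? i := by
  unfold pvUpdStep
  split_ifs <;> first | rfl | exact PySem.Dict.get?_insert_of_ne best d h

lemma pv_pyGetD_cons_pos (d : Int) (t : List Int) (j : Int) (h1 : 1 ≤ j) (h2 : j < (t.length : Int) + 1) :
    PySem.List.pyGetD (d :: t) j 0 = PySem.List.pyGetD t (j - 1) 0 := by
  rw [PySem.List.pyGetD_eq_getElem (d :: t) 0 (by omega) (by simp only [List.length_cons]; push_cast; omega),
      PySem.List.pyGetD_eq_getElem t 0 (by omega) (by omega)]
  have h : j.toNat = (j - 1).toNat + 1 := by omega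
  simp only [h, List.getElem_cons_succ]

lemma pv_inner_get? (b : Bool) (i : Int) :
    ∀ (s : List Int) (k : Int) (best : PySem.Dict Int Int),
      ((PySem.List.enumerate s k).foldl (pvUpdStep b) best).get? i =
        if k ≤ i ∧ i < k + (s.length : Int) then pvUpd b (best.get? i) (PySem.List.pyGetD s (i - k) 0)
        else best.get? i := by
  intro s
  induction s with
  | nil =>
    intro k best
    rw [PySem.List.enumerate_nil, List.foldl_nil, if_neg (by simp only [List.length_nil]; push_cast; omega)]
  | cons d t ih =>
    intro k best
    rw [PySem.List.enumerate_cons, List.foldl_cons, ih (k + 1) (pvUpdStep b best (k, d))]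
    by_cases hik : i = k
    · subst hik
      rw [if_neg (by omega), if_pos (by simp only [List.length_cons]; push_cast; omega)]
      have h0 : i - i = (0 : Int) := by omega
      rw [h0, PySem.List.pyGetD_zero_cons]
      exact pv_updStep_get?_self b best i d
    · rw [pv_updStep_get?_ne b best k d i hik]
      by_cases hin : k + 1 ≤ i ∧ i < k + 1 + (t.length : Int)
      · rw [if_pos hin, if_pos (by simp only [List.length_cons] at hin ⊢; push_cast at hin ⊢; omega)]
        rw [pv_pyGetD_cons_pos d t (i - k) (by omega) (by omega)]
        have : i - k - 1 = i - (k + 1) := by omega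
        rw [this]
      · rw [if_neg hin, if_neg (by simp only [List.length_cons] at hin ⊢; push_cast at hin ⊢; omega)]

lemma pv_outer_get? (b : Bool) (i : Int) (hi : 0 ≤ i) :
    ∀ (shapes : List (List Int)) (best : PySem.Dict Int Int),
      ((shapes.foldl (pvMergeShape b) best)).get? i = shapes.foldl (pvCStep b i) (best.get? i) := by
  intro shapes
  induction shapes with
  | nil => intro best; rfl
  | cons s t ih =>
    intro best
    rw [List.foldl_cons, List.foldl_cons, ih]
    congr 1
    show ((PySem.List.enumerate s 0).foldl (pvUpdStep b) best).get? i = _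
    rw [pv_inner_get? b i s 0 best]
    by_cases hl : (s.length : Int) > i
    · rw [if_pos ⟨hi, by omega⟩, pvCStep, if_pos hl]
      have : i - 0 = i := by omega
      rw [this]
    · rw [if_neg (by omega), pvCStep, if_neg hl]

lemma pv_if_max (r l : Int) : (if l > r then l else r) = max r l := by
  by_cases h : l ≤ r
  · rw [if_neg (not_lt.2 h), max_eq_left h]
  · rw [if_pos (not_le.1 h), max_eq_right (not_le.1 h).le]

-- running maximum of lengths equals Python's max over the nonempty list of lengths
lemma pv_maxlen (x : List Int) (xs : List (List Int)) :
    PySem.List.max? ((x :: xs).map (fun s => (s.length : Int))) (fun y => y) =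
      some ((x :: xs).foldl (fun r s => if ((s.length : Int)) > r then (s.length : Int) else r) 0) := by
  rw [List.map_cons, PySem.List.max?_id_cons, List.foldl_cons, List.foldl_map]
  congr 1
  have h0 : (if ((x.length : Int)) > (0 : Int) then ((x.length : Int)) else (0 : Int)) = (x.length : Int) := by
    rw [pv_if_max]; omega
  rw [h0]
  exact PySem.List.foldl_congr_mem _ _ _ _ (fun acc s _ => (pv_if_max acc (s.length : Int)).symm)

-- ===== VERDICT (by name: the statement is the Claim_ definition above) =====
theorem get_common_shape_spec : Claim_equal_get_common_shape := by
  intro shapes broadcast _ hpre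
  unfold Spec_get_common_shape
  obtain ⟨x, xs, rfl⟩ : ∃ y ys, shapes = y :: ys := by
    cases shapes with
    | nil => exact absurd rfl hpre
    | cons y ys => exact ⟨y, ys, rfl⟩
  unfold get_common_shape get_common_shape_alt
  rw [PySem.List.foldl_prod_mk (f := fun r s => if ((s.length : Int)) > r then (s.length : Int) else r)
        (g := fun best s => pvMergeShape broadcast best s)]
  rw [pv_maxlen]
  simp only []
  rw [PySem.List.foldl_append_singleton_eq_map, List.nil_append]
  refine List.map_congr_left ?_
  intro i hi
  rw [PySem.List.mem_pyRange_one] at hi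
  rw [pv_minDim_eq, PySem.Dict.getD_eq_get?_getD, pv_outer_get? broadcast i hi.1,
      PySem.Dict.get?_empty]
  rw [pv_foldl_cstep_eq broadcast i (x :: xs) none]
  cases broadcast <;> simp
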